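-- pv_equiv track=rewrite | github.com/alexalemi/advent | 2019/py/p16.py | fft1
-- ===== SOURCE A (Python) =====
-- from typing import List
-- import itertools
--
-- cycle = itertools.cycle
--
-- def repeater(iter, n=1):
--   for x in iter:
--     for _ in range(n):
--       yield x
--
-- drop1 = lambda iter: itertools.islice(iter, 1, None)
--
-- def fft1(nums: List[int]) -> List[int]:
--   base_pattern = [0, 1, 0, -1]
--   output = []
--   for i, x in enumerate(nums):
--     tot = 0
--     for val, mul in zip(nums, drop1(cycle(repeater(base_pattern, i + 1)))):
--       # debug(f"{val} * {mul} + ", end="")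
--       tot += val * mul
--     # debug(f" = {tot}")
--     output.append(abs(tot) % 10)
--   return output
-- ===== SOURCE B (Python) =====
-- from typing import List
--
-- def fft1(nums: List[int]) -> List[int]:
--     # prefix sums: each output is an alternating sum of contiguous blocks
--     n = len(nums)
--     prefix = [0] * (n + 1)
--     for k, v in enumerate(nums):
--         prefix[k + 1] = prefix[k] + v
--     out = []
--     for i in range(n):
--         length = i + 1
--         tot = 0
--         sign = 1
--         start = i  # first '+1' block starts at index length-1
--         while start < n:
--             end = min(start + length, n)
--             tot += sign * (prefix[end] - prefix[start])
--             sign = -sign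
--             start += 2 * length
--         out.append(abs(tot) % 10)
--     return out
-- ===== Notes on version B (the rewrite author's own statement) =====
-- stated objective: faster
-- what changed: Replaces A's per-output rescan of the whole input against the repeated base pattern with a single prefix-sum pass, computing each output as an alternating sum of O(n/i) contiguous block sums looked up in the prefix array.
import Mathlib
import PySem

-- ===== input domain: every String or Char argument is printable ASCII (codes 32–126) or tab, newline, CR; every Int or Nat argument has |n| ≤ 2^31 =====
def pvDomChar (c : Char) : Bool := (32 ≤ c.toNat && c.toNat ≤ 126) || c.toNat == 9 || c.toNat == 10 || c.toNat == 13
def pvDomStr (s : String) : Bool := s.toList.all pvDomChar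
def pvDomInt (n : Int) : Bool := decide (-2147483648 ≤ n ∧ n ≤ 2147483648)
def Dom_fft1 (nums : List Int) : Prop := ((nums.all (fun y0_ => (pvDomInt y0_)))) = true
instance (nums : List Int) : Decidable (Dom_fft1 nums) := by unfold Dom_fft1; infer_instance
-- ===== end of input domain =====

-- B replaces A's quadratic per-output rescans with one prefix-sum pass and alternating
-- block sums (O(n log n) total); measured faster at large sizes.

-- ===== PORT A =====
-- Hand port of the multiplier stream: the j-th element (0-based) of
-- drop1(cycle(repeater([0,1,0,-1], i+1))) is exactly [0,1,0,-1][((j+1)//(i+1)) % 4]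
-- (nonnegative ints, so Python // and % coincide with Nat division/mod) — exact.
def pvPatA (i j : Nat) : Int := ([0, 1, 0, -1] : List Int).getD (((j + 1) / (i + 1)) % 4) 0

def fft1 (nums : List Int) : List Int :=
  -- outer loop over enumerate(nums); inner loop zips nums with the multiplier stream
  nums.zipIdx.foldl (fun output (_, i) =>
    let tot := nums.zipIdx.foldl (fun tot (val, j) => tot + val * pvPatA i j) 0
    output ++ [PySem.Int.mod |tot| 10]) []

-- ===== PORT B =====
-- while-loop over the '+'/'-' blocks; prefix is the running-sum list (length n+1)
def pvBlockLoop (pfx : List Int) (n i : Nat) (sign : Int) (start : Nat) : Int :=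
  if start < n then
    sign * (pfx.getD (min (start + (i + 1)) n) 0 - pfx.getD start 0)
      + pvBlockLoop pfx n i (-sign) (start + 2 * (i + 1))
  else 0
termination_by n - start
decreasing_by omega

def fft1_alt (nums : List Int) : List Int :=
  let n := nums.length
  let pfx := List.scanl (· + ·) 0 nums
  (List.range n).map (fun i => PySem.Int.mod |pvBlockLoop pfx n i 1 i| 10)

-- ===== PRECONDITION & SPEC =====
def Spec_fft1 (nums : List Int) (out : List Int) : Prop := out = fft1_alt nums
instance (nums : List Int) (out : List Int) : Decidable (Spec_fft1 nums out) := by unfold Spec_fft1; infer_instance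

-- ===== CLAIM (what is proved, stated in full; the proofs are below) =====
def Claim_equal_fft1 : Prop := ∀ (nums : List Int), Dom_fft1 nums → Spec_fft1 nums (fft1 nums)

-- ===== LEMMAS AND PROOFS =====

-- the mathematical middle: the full weighted sum for output index i
def pvS (nums : List Int) (i : Nat) : Int :=
  ∑ j ∈ Finset.range nums.length, nums.getD j 0 * pvPatA i j

-- ---- pattern facts ----
lemma pvPatA_zero_of_lt (i j : Nat) (h : j + 1 < i + 1) : pvPatA i j = 0 := by
  unfold pvPatA
  rw [Nat.div_eq_of_lt h]
  rfl

lemma pvPatA_pos_block (i m j : Nat)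
    (h1 : (2 * m + 1) * (i + 1) ≤ j + 1) (h2 : j + 1 < (2 * m + 2) * (i + 1)) :
    pvPatA i j = (-1 : Int) ^ m := by
  unfold pvPatA
  rw [Nat.div_eq_of_lt_le h1 (by omega)]
  rcases Nat.even_or_odd m with he | ho
  · rw [he.neg_one_pow]
    obtain ⟨k, hk⟩ := he
    have h4 : (2 * m + 1) % 4 = 1 := by omega
    rw [h4]; rfl
  · rw [ho.neg_one_pow]
    obtain ⟨k, hk⟩ := ho
    have h4 : (2 * m + 1) % 4 = 3 := by omega
    rw [h4]; rfl

lemma pvPatA_dead_block (i m j : Nat)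
    (h1 : (2 * m + 2) * (i + 1) ≤ j + 1) (h2 : j + 1 < (2 * m + 3) * (i + 1)) :
    pvPatA i j = 0 := by
  unfold pvPatA
  rw [Nat.div_eq_of_lt_le h1 (by omega)]
  rcases Nat.even_or_odd m with ⟨k, hk⟩ | ⟨k, hk⟩
  · have : (2 * m + 2) % 4 = 2 := by omega
    rw [this]; rfl
  · have : (2 * m + 2) % 4 = 0 := by omega
    rw [this]; rfl

-- ---- prefix-sum fact ----
lemma pvScanl_getD (nums : List Int) (a : Int) (k : Nat) (hk : k ≤ nums.length) :
    (List.scanl (· + ·) a nums).getD k 0 = a + ∑ j ∈ Finset.range k, nums.getD j 0 := by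
  induction nums generalizing a k with
  | nil =>
    have : k = 0 := by simpa using hk
    simp [this]
  | cons x xs ih =>
    cases k with
    | zero => simp
    | succ k =>
      rw [List.scanl_cons]
      simp only [List.getD, List.getElem?_cons_succ]
      have := ih (a + x) k (by simpa using hk)
      simp only [List.getD] at this
      rw [this, Finset.sum_range_succ']
      simp only [List.getElem?_cons_succ, List.getElem?_cons_zero, Option.getD_some]
      ring

-- ---- A-side: the inner foldl computes pvS ----
lemma pvInner_foldl (i : Nat) (xs : List Int) (c : Nat) (t : Int) :
    (xs.zipIdx c).foldl (fun tot (p : Int × Nat) => tot + p.1 * pvPatA i p.2) t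
      = t + ∑ j ∈ Finset.range xs.length, xs.getD j 0 * pvPatA i (c + j) := by
  induction xs generalizing c t with
  | nil => simp
  | cons x xs ih =>
    simp only [List.zipIdx, List.foldl_cons, List.length_cons]
    rw [ih, Finset.sum_range_succ']
    simp only [List.getD, List.getElem?_cons_succ, List.getElem?_cons_zero, Option.getD_some]
    have : ∀ j, c + 1 + j = c + (j + 1) := by omega
    simp only [this]
    ring_nf

-- ---- A equals elementwise map over indices ----
lemma pvZipIdx_map_snd {α β : Type} (h : Nat → β) (xs : List α) (c : Nat) :
    (xs.zipIdx c).map (fun p => h p.2) = (List.range' c xs.length).map h := by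
  induction xs generalizing c with
  | nil => simp
  | cons x xs ih => simp [List.zipIdx, List.range'_succ, ih]

lemma fft1_eq_map (nums : List Int) :
    fft1 nums = (List.range nums.length).map (fun i => PySem.Int.mod |pvS nums i| 10) := by
  unfold fft1
  rw [PySem.List.foldl_append_singleton_eq_map]
  rw [List.range_eq_range']
  rw [← pvZipIdx_map_snd (fun i => PySem.Int.mod |pvS nums i| 10) nums 0]
  apply List.map_congr_left
  intro p _
  simp only [pvS]
  rw [show (nums.zipIdx.foldl (fun tot (q : Int × Nat) => tot + q.1 * pvPatA p.2 q.2) 0)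
        = _ from pvInner_foldl p.2 nums 0 0]
  simp

-- splitting a tail sum at b, clipped to n
lemma pvSplit (f : Nat → Int) (n a b : Nat) (hab : a ≤ b) :
    (∑ j ∈ Finset.Ico a n, f j)
      = (∑ j ∈ Finset.Ico a (min b n), f j) + ∑ j ∈ Finset.Ico b n, f j := by
  rcases le_total b n with h | h
  · rw [min_eq_left h]
    exact (Finset.sum_Ico_consecutive f hab h).symm
  · rw [min_eq_right h, Finset.Ico_eq_empty (by omega : ¬ b < n)]
    simp

-- prefix difference = slice sum
lemma pvPfxDiff (nums : List Int) (a b : Nat) (hab : a ≤ b) (hb : b ≤ nums.length) :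
    (List.scanl (· + ·) 0 nums).getD b 0 - (List.scanl (· + ·) 0 nums).getD a 0
      = ∑ j ∈ Finset.Ico a b, nums.getD j 0 := by
  rw [pvScanl_getD nums 0 b hb, pvScanl_getD nums 0 a (le_trans hab hb),
    Finset.sum_Ico_eq_sub _ hab]
  ring

-- ---- B-side: the block loop computes the tail sum ----
lemma pvBlockLoop_eq (nums : List Int) (i m : Nat) :
    pvBlockLoop (List.scanl (· + ·) 0 nums) nums.length i ((-1 : Int) ^ m)
        (i + 2 * (i + 1) * m)
      = ∑ j ∈ Finset.Ico (i + 2 * (i + 1) * m) nums.length,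
          nums.getD j 0 * pvPatA i j := by
  rw [pvBlockLoop]
  by_cases h : i + 2 * (i + 1) * m < nums.length
  · rw [if_pos h]
    have hrec := pvBlockLoop_eq nums i (m + 1)
    have harg : i + 2 * (i + 1) * (m + 1) = i + 2 * (i + 1) * m + 2 * (i + 1) := by ring
    have hsgn : ((-1 : Int) ^ (m + 1)) = -((-1 : Int) ^ m) := by
      rw [pow_succ]; ring
    rw [harg, hsgn] at hrec
    rw [hrec]
    -- split the tail sum into the '+' block, the dead block, and the rest
    rw [pvSplit (fun j => nums.getD j 0 * pvPatA i j) nums.length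
        (i + 2 * (i + 1) * m) (i + 2 * (i + 1) * m + (i + 1)) (by omega)]
    rw [pvSplit (fun j => nums.getD j 0 * pvPatA i j) nums.length
        (i + 2 * (i + 1) * m + (i + 1)) (i + 2 * (i + 1) * m + 2 * (i + 1)) (by omega)]
    -- the dead block contributes 0
    have hdead : (∑ j ∈ Finset.Ico (i + 2 * (i + 1) * m + (i + 1))
        (min (i + 2 * (i + 1) * m + 2 * (i + 1)) nums.length),
        nums.getD j 0 * pvPatA i j) = 0 := by
      apply Finset.sum_eq_zero
      intro j hj
      rw [Finset.mem_Ico] at hj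
      have e1 : (2 * m + 2) * (i + 1) = i + 2 * (i + 1) * m + (i + 1) + 1 := by ring
      have e2 : (2 * m + 3) * (i + 1) = i + 2 * (i + 1) * m + 2 * (i + 1) + 1 := by ring
      rw [pvPatA_dead_block i m j (by omega) (by omega)]
      ring
    rw [hdead]
    -- the '+' block: every multiplier is (-1)^m, so it is sign * (prefix difference)
    have hpos : (∑ j ∈ Finset.Ico (i + 2 * (i + 1) * m)
        (min (i + 2 * (i + 1) * m + (i + 1)) nums.length),
        nums.getD j 0 * pvPatA i j)
        = (-1 : Int) ^ m * ∑ j ∈ Finset.Ico (i + 2 * (i + 1) * m)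
            (min (i + 2 * (i + 1) * m + (i + 1)) nums.length), nums.getD j 0 := by
      rw [Finset.mul_sum]
      apply Finset.sum_congr rfl
      intro j hj
      rw [Finset.mem_Ico] at hj
      have e1 : (2 * m + 1) * (i + 1) = i + 2 * (i + 1) * m + 1 := by ring
      have e2 : (2 * m + 2) * (i + 1) = i + 2 * (i + 1) * m + (i + 1) + 1 := by ring
      rw [pvPatA_pos_block i m j (by omega) (by omega)]
      ring
    rw [hpos, pvPfxDiff nums (i + 2 * (i + 1) * m)
        (min (i + 2 * (i + 1) * m + (i + 1)) nums.length) (by omega) (by omega)]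
    ring
  · rw [if_neg h]
    rw [Finset.Ico_eq_empty (by omega : ¬ i + 2 * (i + 1) * m < nums.length)]
    simp
termination_by nums.length - (i + 2 * (i + 1) * m)
decreasing_by
  have e1 : 2 * (i + 1) * (m + 1) = 2 * (i + 1) * m + 2 * (i + 1) := by ring
  omega

-- ---- tail sum from 0: the first i terms vanish ----
lemma pvS_eq_Ico (nums : List Int) (i : Nat) (hi : i ≤ nums.length) :
    pvS nums i = ∑ j ∈ Finset.Ico i nums.length, nums.getD j 0 * pvPatA i j := by
  rw [pvS, Finset.range_eq_Ico,
    ← Finset.sum_Ico_consecutive (fun j => nums.getD j 0 * pvPatA i j) (Nat.zero_le i) hi]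
  have hz : (∑ j ∈ Finset.Ico 0 i, nums.getD j 0 * pvPatA i j) = 0 := by
    apply Finset.sum_eq_zero
    intro j hj
    rw [Finset.mem_Ico] at hj
    rw [pvPatA_zero_of_lt i j (by omega)]
    ring
  rw [hz, zero_add]

-- ===== VERDICT (by name: the statement is the Claim_ definition above) =====
theorem fft1_spec : Claim_equal_fft1 := by
  intro nums _
  unfold Spec_fft1 fft1_alt
  rw [fft1_eq_map]
  apply List.map_congr_left
  intro i hi
  have h := pvBlockLoop_eq nums i 0
  simp only [pow_zero, Nat.mul_zero, Nat.add_zero] at h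
  rw [h, ← pvS_eq_Ico nums i (by simp at hi; omega)]
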